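-- pv_equiv track=rewrite | github.com/Komzpa/openweathermap-feeder | cron_handler.py | compact_readings
-- ===== SOURCE A (Python) =====
-- from collections import defaultdict
--
-- def compact_readings(r):
--     dedup = defaultdict(dict)
--     for reading in r:
--         dedup[reading['dt']].update(reading)
--     out = []
--     for ts in sorted(dedup.keys()):
--         out.append(dedup[ts])
--     return out
-- ===== SOURCE B (Python) =====
-- def compact_readings(r):
--     out = []
--     for ts in sorted({x['dt'] for x in r}):
--         merged = {}
--         for x in r:
--             if x['dt'] == ts:
--                 merged.update(x)
--         out.append(merged)
--     return out
-- ===== Notes on version B (the rewrite author's own statement) =====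
-- stated objective: alternative
-- what changed: Replaces the defaultdict-of-dicts grouping (build hash of groups, then sort keys and emit) with a dict-free nested scan: compute the sorted set of distinct timestamps once, then for each timestamp rescan the input merging the matching readings in order.
import Mathlib
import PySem

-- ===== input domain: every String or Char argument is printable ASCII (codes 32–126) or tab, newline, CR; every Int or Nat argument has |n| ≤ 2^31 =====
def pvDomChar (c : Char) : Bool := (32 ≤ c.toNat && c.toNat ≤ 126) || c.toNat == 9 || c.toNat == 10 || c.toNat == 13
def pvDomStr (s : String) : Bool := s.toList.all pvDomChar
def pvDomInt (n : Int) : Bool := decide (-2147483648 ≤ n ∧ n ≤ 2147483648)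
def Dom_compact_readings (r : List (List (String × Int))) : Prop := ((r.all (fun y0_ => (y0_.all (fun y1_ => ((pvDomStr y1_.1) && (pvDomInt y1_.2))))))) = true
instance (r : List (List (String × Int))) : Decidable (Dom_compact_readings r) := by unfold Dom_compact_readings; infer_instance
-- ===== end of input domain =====

-- B replaces A's defaultdict-of-dicts grouping with a dict-free nested scan: sorted distinct
-- timestamps first, then one merging rescan of the input per timestamp (alternative, not faster).


-- reading['dt']; Pre_ guarantees the key is present (Python raises KeyError otherwise)
def pvDt (reading : List (String × Int)) : Int :=
  ((PySem.Dict.mk reading).get? "dt").getD 0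

-- ===== PORT A =====
-- dedup[reading['dt']].update(reading): defaultdict(dict) access inserts an empty dict on first use
def pvStepA (d : PySem.Dict Int (PySem.Dict String Int)) (reading : List (String × Int)) :
    PySem.Dict Int (PySem.Dict String Int) :=
  d.insert (pvDt reading) ((d.getD (pvDt reading) PySem.Dict.empty).update reading)

def compact_readings (r : List (List (String × Int))) : List (List (String × Int)) :=
  let dedup := r.foldl pvStepA PySem.Dict.empty
  (PySem.List.sorted dedup.keys id).foldl
    (fun out ts => out ++ [(dedup.getD ts PySem.Dict.empty).items]) []

-- ===== PORT B =====
def compact_readings_alt (r : List (List (String × Int))) : List (List (String × Int)) :=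
  (PySem.List.sorted (PySem.Set.ofList (r.map pvDt)) id).foldl
    (fun out ts =>
      out ++ [(r.foldl
        (fun merged x => if pvDt x == ts then merged.update x else merged)
        (PySem.Dict.empty : PySem.Dict String Int)).items]) []

-- ===== PRECONDITION & SPEC =====
-- Pre_ excludes exactly the inputs where A raises KeyError: a reading without a 'dt' key
-- (B raises there too).
def Pre_compact_readings (r : List (List (String × Int))) : Prop :=
  (r.all (fun reading => (PySem.Dict.mk reading).contains "dt")) = true
instance (r : List (List (String × Int))) : Decidable (Pre_compact_readings r) := by
  unfold Pre_compact_readings; infer_instance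

def pvWitness_compact_readings : (List (List (String × Int))) :=
  [[("dt", 1), ("a", 2)], [("dt", 1), ("b", 3)], [("dt", 0), ("a", 5)]]

def Spec_compact_readings (r : List (List (String × Int))) (out : List (List (String × Int))) : Prop := out = compact_readings_alt r
instance (r : List (List (String × Int))) (out : List (List (String × Int))) : Decidable (Spec_compact_readings r out) := by unfold Spec_compact_readings; infer_instance

-- ===== CLAIM (what is proved, stated in full; the proofs are below) =====
def Claim_equal_compact_readings : Prop := ∀ (r : List (List (String × Int))), Dom_compact_readings r → Pre_compact_readings r → Spec_compact_readings r (compact_readings r)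

-- ===== LEMMAS AND PROOFS =====

-- A's per-timestamp group equals B's filtered merge pass, for any starting dict state.
theorem pvGroup_eq (r : List (List (String × Int)))
    (d : PySem.Dict Int (PySem.Dict String Int)) (ts : Int) :
    (r.foldl pvStepA d).getD ts PySem.Dict.empty =
      r.foldl (fun merged x => if pvDt x == ts then merged.update x else merged)
        (d.getD ts PySem.Dict.empty) := by
  induction r generalizing d with
  | nil => rfl
  | cons x xs ih =>
    simp only [List.foldl_cons, ih]
    congr 1
    by_cases h : pvDt x = ts
    · subst h; simp [pvStepA]
    · have : (pvDt x == ts) = false := by simp [h]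
      simp [pvStepA, PySem.Dict.getD_insert, Ne.symm h, this]

theorem pvKeys_eq (r : List (List (String × Int))) :
    (r.foldl pvStepA PySem.Dict.empty).keys = PySem.Set.ofList (r.map pvDt) := by
  have h := PySem.Dict.keys_foldl_insert_key r pvDt
    (fun d x => (d.getD (pvDt x) PySem.Dict.empty).update x) PySem.Dict.empty
  simpa [pvStepA, PySem.Dict.keys_empty] using h

-- ===== VERDICT (by name: the statement is the Claim_ definition above) =====
theorem compact_readings_spec : Claim_equal_compact_readings := by
  intro r _ _
  unfold Spec_compact_readings compact_readings compact_readings_alt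
  simp only [pvKeys_eq, PySem.List.foldl_append_singleton_eq_map, List.nil_append]
  exact List.map_congr_left (fun ts _ => by
    rw [pvGroup_eq r PySem.Dict.empty ts, PySem.Dict.getD_empty])
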